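-- pv_equiv track=rewrite | github.com/sail-sg/TeamHOI | teamhoi/utils/task_util.py | divide_envs
-- ===== SOURCE A (Python) =====
-- def divide_envs(num_envs: int, num_assets: int):
--     """
--     Divide num_envs environments into contiguous ranges for each asset type.
--
--     Args:
--         num_envs   : total number of envs (int)
--         num_assets : number of different assets (int)
--
--     Returns:
--         A list of (start, end) tuples, one per asset.
--         Each covers a contiguous block of env_ids.
--     """
--     base = num_envs // num_assets
--     remainder = num_envs % num_assets
--
--     ranges = []
--     start = 0
--     for i in range(num_assets):
--         # spread the remainder across the first `remainder` chunks
--         size = base + (1 if i < remainder else 0)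
--         end = start + size
--         ranges.append((start, end))
--         start = end
--     return ranges
-- ===== SOURCE B (Python) =====
-- def divide_envs(num_envs: int, num_assets: int):
--     base, remainder = divmod(num_envs, num_assets)
--     return [(i * base + min(i, remainder),
--              (i + 1) * base + min(i + 1, remainder))
--             for i in range(num_assets)]
-- ===== Notes on version B (the rewrite author's own statement) =====
-- stated objective: simpler
-- what changed: Replaced the stateful loop carrying a running `start` accumulator with a comprehension computing each range boundary independently by the closed form i*base + min(i, remainder).
import Mathlib
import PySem

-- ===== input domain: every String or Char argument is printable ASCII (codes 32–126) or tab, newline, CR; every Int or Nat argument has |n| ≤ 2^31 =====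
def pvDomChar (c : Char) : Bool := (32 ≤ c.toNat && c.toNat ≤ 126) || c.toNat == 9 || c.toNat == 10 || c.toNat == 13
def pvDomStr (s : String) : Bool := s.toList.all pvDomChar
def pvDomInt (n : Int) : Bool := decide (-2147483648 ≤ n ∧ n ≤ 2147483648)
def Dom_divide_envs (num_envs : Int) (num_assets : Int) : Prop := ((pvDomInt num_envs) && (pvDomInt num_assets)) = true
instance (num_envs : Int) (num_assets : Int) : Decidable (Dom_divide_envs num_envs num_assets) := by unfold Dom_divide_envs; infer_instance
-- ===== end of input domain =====

-- ===== PORT A =====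
-- Transliteration of A: stateful loop accumulating (ranges, start).
def divide_envs (num_envs : Int) (num_assets : Int) : List (Int × Int) :=
  let base := PySem.Int.floordiv num_envs num_assets
  let remainder := PySem.Int.mod num_envs num_assets
  ((PySem.List.pyRange 0 num_assets 1).foldl
    (fun (st : List (Int × Int) × Int) i =>
      let size := base + (if i < remainder then (1:Int) else 0)
      let endv := st.2 + size
      (st.1 ++ [(st.2, endv)], endv)) ([], 0)).1

-- ===== PORT B =====
-- B: each boundary computed independently by a closed form; no running accumulator.
def divide_envs_alt (num_envs : Int) (num_assets : Int) : List (Int × Int) :=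
  let base := PySem.Int.floordiv num_envs num_assets
  let remainder := PySem.Int.mod num_envs num_assets
  (PySem.List.pyRange 0 num_assets 1).map
    (fun i => (i * base + min i remainder, (i + 1) * base + min (i + 1) remainder))

-- ===== PRECONDITION & SPEC =====
-- Pre_ excludes num_assets = 0, where A raises ZeroDivisionError (B raises too).
def Pre_divide_envs (_num_envs : Int) (num_assets : Int) : Prop := num_assets ≠ 0
instance (num_envs : Int) (num_assets : Int) : Decidable (Pre_divide_envs num_envs num_assets) := by unfold Pre_divide_envs; infer_instance
def pvWitness_divide_envs : Int × Int := (10, 3)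
def Spec_divide_envs (num_envs : Int) (num_assets : Int) (out : List (Int × Int)) : Prop := out = divide_envs_alt num_envs num_assets
instance (num_envs : Int) (num_assets : Int) (out : List (Int × Int)) : Decidable (Spec_divide_envs num_envs num_assets out) := by unfold Spec_divide_envs; infer_instance

-- ===== CLAIM =====
def Claim_equal_divide_envs : Prop := ∀ (num_envs : Int) (num_assets : Int), Dom_divide_envs num_envs num_assets → Pre_divide_envs num_envs num_assets → Spec_divide_envs num_envs num_assets (divide_envs num_envs num_assets)

-- ===== LEMMAS AND PROOFS =====

-- closed-form start of chunk k
def pvStart (base rem : Int) (k : Int) : Int := k * base + min k rem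

lemma pvStart_succ (base rem : Int) (_hrem : 0 ≤ rem) (k : Int) (_hk : 0 ≤ k) :
    pvStart base rem (k + 1) = pvStart base rem k + (base + (if k < rem then (1:Int) else 0)) := by
  unfold pvStart
  rcases lt_or_ge k rem with h | h
  · rw [if_pos h, min_eq_left (le_of_lt h), min_eq_left (by omega : k + 1 ≤ rem)]; ring
  · rw [if_neg (not_lt.mpr h), min_eq_right h, min_eq_right (by omega : rem ≤ k + 1)]; ring

lemma pv_loop_eq (base rem : Int) (hrem : 0 ≤ rem) (n : Nat) :
    ((List.range n).map (fun k : Nat => (0:Int) + (k:Int))).foldl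
      (fun (st : List (Int × Int) × Int) i =>
        let size := base + (if i < rem then (1:Int) else 0)
        let endv := st.2 + size
        (st.1 ++ [(st.2, endv)], endv)) ([], 0)
    = (((List.range n).map (fun k : Nat => (0:Int) + (k:Int))).map
        (fun i => (i * base + min i rem, (i + 1) * base + min (i + 1) rem)),
       pvStart base rem n) := by
  induction n with
  | zero => simp [pvStart]; omega
  | succ m ih =>
    rw [List.range_succ, List.map_append, List.foldl_append, ih, List.map_append]
    have hs := pvStart_succ base rem hrem (m : Int) (by positivity)
    simp only [List.map_cons, List.map_nil, List.foldl_cons, List.foldl_nil]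
    refine Prod.ext ?_ ?_
    · simp only [List.append_cancel_left_eq, List.cons.injEq, and_true, Prod.mk.injEq]
      constructor
      · simp [pvStart]
      · simp only [pvStart] at hs ⊢
        ring_nf at hs ⊢
        omega
    · simp only [pvStart] at hs ⊢
      push_cast at hs ⊢
      ring_nf at hs ⊢
      omega

-- ===== VERDICT =====
theorem divide_envs_spec : Claim_equal_divide_envs := by
  intro num_envs num_assets _ hpre
  unfold Spec_divide_envs divide_envs divide_envs_alt
  dsimp only
  rcases lt_trichotomy num_assets 0 with h | h | h
  · have he : PySem.List.pyRange 0 num_assets 1 = [] := by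
      rw [PySem.List.pyRange_one]
      have h0 : (num_assets - 0).toNat = 0 := by omega
      rw [h0]; rfl
    rw [he]; rfl
  · exact absurd h hpre
  · have hrem : 0 ≤ PySem.Int.mod num_envs num_assets := by
      rw [PySem.Int.mod_eq_emod_of_pos h]
      exact Int.emod_nonneg _ (by omega)
    rw [PySem.List.pyRange_one]
    have hn : (num_assets - 0).toNat = num_assets.toNat := by omega
    rw [hn]
    exact congrArg Prod.fst (pv_loop_eq _ _ hrem num_assets.toNat)
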